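-- pv_equiv track=rewrite | github.com/Dan-jpg2/CSIK_Prog | modul10/o0_to_o5.py | active_period_by_username
-- ===== SOURCE A (Python) =====
-- def active_period_by_username(auth_log):
--     n = len(auth_log)
--     d = {}
--     i = 0
--     while i < n:
--         hostname, timestamp, username, result = auth_log[i]
--
--         if username not in d:
--             #første login for brugeren
--             d[username] = (timestamp, timestamp)
--         else:
--             #opdatere første og sidste login
--             first, last = d[username]
--             if timestamp < first:
--                 first = timestamp
--             if timestamp > last:
--                 last = timestamp
--             d[username] = (first, last)
--         i += 1
--     return d
-- ===== SOURCE B (Python) =====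
-- def active_period_by_username(auth_log):
--     # group-then-reduce: collect every timestamp per user, then take min/max
--     groups = {}
--     for hostname, timestamp, username, result in auth_log:
--         groups.setdefault(username, []).append(timestamp)
--     periods = {}
--     for username, ts in groups.items():
--         periods[username] = (min(ts), max(ts))
--     return periods
-- ===== Notes on version B (the rewrite author's own statement) =====
-- stated objective: alternative
-- what changed: Replaces A's indexed while-loop that incrementally maintains a running (first,last) pair per user with a two-pass group-then-reduce: one pass collects all timestamps per user into lists, a second pass maps each list to (min, max).
import Mathlib
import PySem

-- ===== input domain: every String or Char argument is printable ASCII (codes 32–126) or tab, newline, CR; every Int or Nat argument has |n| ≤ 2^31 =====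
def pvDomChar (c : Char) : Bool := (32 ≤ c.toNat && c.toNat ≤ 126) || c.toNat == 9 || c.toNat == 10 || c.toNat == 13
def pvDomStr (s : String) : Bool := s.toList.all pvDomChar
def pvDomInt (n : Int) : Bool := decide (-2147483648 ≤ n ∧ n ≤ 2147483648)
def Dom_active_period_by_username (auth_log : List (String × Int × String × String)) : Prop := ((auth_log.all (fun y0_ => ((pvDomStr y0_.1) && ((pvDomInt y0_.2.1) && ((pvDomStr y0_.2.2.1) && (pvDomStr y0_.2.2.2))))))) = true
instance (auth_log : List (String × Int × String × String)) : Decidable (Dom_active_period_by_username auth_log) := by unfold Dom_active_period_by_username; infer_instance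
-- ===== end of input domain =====

-- B replaces A's incremental running-(first,last) update with an explicit group-then-reduce
-- (collect each user's timestamps, then take min/max); alternative decomposition, same cost.

-- ===== PORT A =====
-- A's while-loop over indices 0..n-1 is the fold over the list, carrying the dict d.
def active_period_by_username (auth_log : List (String × Int × String × String)) : List (String × Int × Int) :=
  (auth_log.foldl (fun d x =>
      match d.get? x.2.2.1 with
      | none => d.insert x.2.2.1 (x.2.1, x.2.1)
      | some (first, last) =>
          let first := if x.2.1 < first then x.2.1 else first
          let last := if x.2.1 > last then x.2.1 else last
          d.insert x.2.2.1 (first, last))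
    PySem.Dict.empty).items

-- ===== PORT B =====
def active_period_by_username_alt (auth_log : List (String × Int × String × String)) : List (String × Int × Int) :=
  let groups := auth_log.foldl (fun g x => g.modify x.2.2.1 [] (· ++ [x.2.1])) PySem.Dict.empty
  (groups.items.foldl (fun r p =>
      r.insert p.1 ((PySem.List.min? p.2 (fun y => y)).getD 0,
                    (PySem.List.max? p.2 (fun y => y)).getD 0))
    PySem.Dict.empty).items

-- ===== PRECONDITION & SPEC =====
def Spec_active_period_by_username (auth_log : List (String × Int × String × String)) (out : List (String × Int × Int)) : Prop := out = active_period_by_username_alt auth_log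
instance (auth_log : List (String × Int × String × String)) (out : List (String × Int × Int)) : Decidable (Spec_active_period_by_username auth_log out) := by unfold Spec_active_period_by_username; infer_instance

-- ===== CLAIM (what is proved, stated in full; the proofs are below) =====
def Claim_equal_active_period_by_username : Prop := ∀ (auth_log : List (String × Int × String × String)), Dom_active_period_by_username auth_log → Spec_active_period_by_username auth_log (active_period_by_username auth_log)

-- ===== LEMMAS AND PROOFS =====

def pvTs (u : String) (l : List (String × Int × String × String)) : List Int :=
  (l.filter (fun x => x.2.2.1 == u)).map (·.2.1)

def pvUpd (o : Option (Int × Int)) (t : Int) : Int × Int :=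
  match o with
  | none => (t, t)
  | some (f, la) => (if t < f then t else f, if t > la then t else la)

def pvStepA (d : PySem.Dict String (Int × Int)) (x : String × Int × String × String) :
    PySem.Dict String (Int × Int) :=
  match d.get? x.2.2.1 with
  | none => d.insert x.2.2.1 (x.2.1, x.2.1)
  | some (first, last) =>
      let first := if x.2.1 < first then x.2.1 else first
      let last := if x.2.1 > last then x.2.1 else last
      d.insert x.2.2.1 (first, last)

theorem pvStepA_eq (d : PySem.Dict String (Int × Int)) (x : String × Int × String × String) :
    pvStepA d x = d.insert x.2.2.1 (pvUpd (d.get? x.2.2.1) x.2.1) := by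
  unfold pvStepA pvUpd
  cases d.get? x.2.2.1 with
  | none => rfl
  | some p => cases p; rfl

theorem pvStepA_funext :
    pvStepA = fun (d : PySem.Dict String (Int × Int)) x => d.insert x.2.2.1 (pvUpd (d.get? x.2.2.1) x.2.1) := by
  funext d x; exact pvStepA_eq d x

theorem getA (l : List (String × Int × String × String)) (d : PySem.Dict String (Int × Int)) (u : String) :
    (l.foldl pvStepA d).get? u = (pvTs u l).foldl (fun o t => some (pvUpd o t)) (d.get? u) := by
  induction l generalizing d with
  | nil => rfl
  | cons x l ih =>
    simp only [List.foldl_cons, ih, pvStepA_eq]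
    by_cases h : x.2.2.1 = u
    · subst h
      simp [pvTs]
    · rw [PySem.Dict.get?_insert]
      simp [pvTs, h, Ne.symm h]

theorem foldUpd_some (ts : List Int) (f la : Int) :
    ts.foldl (fun o t => some (pvUpd o t)) (some (f, la))
      = some (ts.foldl (fun (p : Int × Int) t => (if t < p.1 then t else p.1, if t > p.2 then t else p.2)) (f, la)) := by
  induction ts generalizing f la with
  | nil => rfl
  | cons t ts ih =>
    simp only [List.foldl_cons]
    have h1 : pvUpd (some (f, la)) t = (if t < f then t else f, if t > la then t else la) := rfl
    rw [h1, ih]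

theorem pair_fold_minmax (ts : List Int) (f la : Int) :
    ts.foldl (fun (p : Int × Int) t => (if t < p.1 then t else p.1, if t > p.2 then t else p.2)) (f, la)
      = (ts.foldl min f, ts.foldl max la) := by
  induction ts generalizing f la with
  | nil => rfl
  | cons t ts ih =>
    simp only [List.foldl_cons, ih]
    congr 1 <;> [skip; skip] <;> congr 1 <;> omega

def pvGFold (l : List (String × Int × String × String)) : PySem.Dict String (List Int) :=
  l.foldl (fun g x => g.modify x.2.2.1 [] (· ++ [x.2.1])) PySem.Dict.empty

def pvMm (ts : List Int) : Int × Int :=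
  ((PySem.List.min? ts (fun y => y)).getD 0, (PySem.List.max? ts (fun y => y)).getD 0)

theorem keysA (l : List (String × Int × String × String)) :
    (l.foldl pvStepA PySem.Dict.empty).keys = PySem.Set.ofList (l.map (·.2.2.1)) := by
  rw [pvStepA_funext, PySem.Dict.keys_foldl_insert_key]
  simp [PySem.Set.update_nil_left]

theorem nodupA (l : List (String × Int × String × String)) :
    (l.foldl pvStepA PySem.Dict.empty).keys.Nodup := by
  rw [pvStepA_funext]
  exact PySem.Dict.nodup_keys_foldl_insert_key _ _ _ _ (by simp [PySem.Dict.keys_empty])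

theorem keysG (l : List (String × Int × String × String)) :
    (pvGFold l).keys = PySem.Set.ofList (l.map (·.2.2.1)) := by
  unfold pvGFold
  rw [PySem.Dict.keys_foldl_modify_key]
  simp [PySem.Set.update_nil_left]

theorem nodupG (l : List (String × Int × String × String)) :
    (pvGFold l).keys.Nodup := by
  unfold pvGFold
  exact PySem.Dict.nodup_keys_foldl_modify_key _ _ _ _ _ (by simp [PySem.Dict.keys_empty])

theorem getDG (l : List (String × Int × String × String)) (u : String) :
    (pvGFold l).getD u [] = pvTs u l := by
  have e : pvGFold l = (l.map (fun x => (x.2.2.1, x.2.1))).foldl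
      (fun (g : PySem.Dict String (List Int)) (p : String × Int) => g.modify p.1 [] (· ++ [p.2]))
      PySem.Dict.empty := by
    unfold pvGFold
    exact (List.foldl_map (f := fun (x : String × Int × String × String) => (x.2.2.1, x.2.1))
      (g := fun (g : PySem.Dict String (List Int)) (p : String × Int) => g.modify p.1 [] (· ++ [p.2]))
      (l := l) (init := PySem.Dict.empty)).symm
  rw [e, PySem.Dict.getD_foldl_modify_append]
  simp only [pvTs, List.filter_map, List.map_map]
  rfl

theorem pvTs_ne_nil (l : List (String × Int × String × String)) (u : String)
    (h : u ∈ l.map (·.2.2.1)) : pvTs u l ≠ [] := by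
  obtain ⟨x, hx, he⟩ := List.mem_map.1 h
  simp only [pvTs, ne_eq, List.map_eq_nil_iff, List.filter_eq_nil_iff]
  intro hc
  exact hc x hx (by simp [he])

theorem pvMain (l : List (String × Int × String × String)) :
    active_period_by_username l = active_period_by_username_alt l := by
  have hB : active_period_by_username_alt l = (pvGFold l).items.map (fun p => (p.1, pvMm p.2)) := by
    show ((pvGFold l).items.foldl (fun r p => r.insert p.1 (pvMm p.2)) PySem.Dict.empty).items = _
    have hnod : ((pvGFold l).items.map (·.1)).Nodup := nodupG l
    rw [PySem.Dict.items_foldl_insert_fresh (pvGFold l).items (fun p => p.1) (fun p => pvMm p.2)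
        PySem.Dict.empty (fun a _ => PySem.Dict.contains_empty _) hnod]
    rfl
  have hA : active_period_by_username l
      = (PySem.Set.ofList (l.map (·.2.2.1))).map
          (fun k => (k, (l.foldl pvStepA PySem.Dict.empty).getD k ((0 : Int), (0 : Int)))) := by
    show (l.foldl pvStepA PySem.Dict.empty).items = _
    rw [PySem.Dict.items_eq_map_keys _ (nodupA l) ((0 : Int), (0 : Int)), keysA]
  have hG : (pvGFold l).items
      = (PySem.Set.ofList (l.map (·.2.2.1))).map (fun k => (k, (pvGFold l).getD k [])) := by
    rw [PySem.Dict.items_eq_map_keys _ (nodupG l) ([] : List Int), keysG]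
  rw [hA, hB, hG, List.map_map]
  apply List.map_congr_left
  intro k hk
  have hk' : k ∈ l.map (·.2.2.1) := (PySem.Set.mem_ofList _ _).1 hk
  obtain ⟨h, t, ht⟩ : ∃ h t, pvTs k l = h :: t := by
    cases hts : pvTs k l with
    | nil => exact absurd hts (pvTs_ne_nil l k hk')
    | cons a b => exact ⟨a, b, rfl⟩
  have hAv : (l.foldl pvStepA PySem.Dict.empty).get? k = some (t.foldl min h, t.foldl max h) := by
    rw [getA, PySem.Dict.get?_empty, ht]
    simp only [List.foldl_cons]
    rw [show pvUpd none h = (h, h) from rfl, foldUpd_some, pair_fold_minmax]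
  simp only [Function.comp_apply]
  rw [PySem.Dict.getD_eq_get?_getD, hAv, getDG, ht]
  unfold pvMm
  rw [PySem.List.min?_id_cons, PySem.List.max?_id_cons]
  rfl

-- ===== VERDICT (by name: the statement is the Claim_ definition above) =====
theorem active_period_by_username_spec : Claim_equal_active_period_by_username := by
  intro l _
  unfold Spec_active_period_by_username
  exact pvMain l
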